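-- pv_equiv track=rewrite | github.com/FABIANB3TANCOUR/proyecto-pl-asesor-financiero | motor_inferencia.py | obtener_objetivo
-- ===== SOURCE A (Python) =====
-- def obtener_objetivo(prioridades, hechos, index=0):
--     # Caso base
--     if index >= len(hechos):
--         return None
--
--     hecho = hechos[index]
--
--     if hecho[0] == 'objetivo':
--         _, valor, detalle = hecho
--         if any(p in detalle for p in prioridades):
--             return valor
--
--     return obtener_objetivo(prioridades, hechos, index + 1)
-- ===== SOURCE B (Python) =====
-- def obtener_objetivo(prioridades, hechos, index=0):
--     for i in range(index, len(hechos)):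
--         hecho = hechos[i]
--         if hecho[0] == 'objetivo':
--             _, valor, detalle = hecho
--             if any(p in detalle for p in prioridades):
--                 return valor
--     return None
-- ===== Notes on version B (the rewrite author's own statement) =====
-- stated objective: simpler
-- what changed: Replaces A's tail recursion with index+1 by a single iterative for-loop over range(index, len(hechos)); same access sequence, no recursion depth limit.
import Mathlib
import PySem

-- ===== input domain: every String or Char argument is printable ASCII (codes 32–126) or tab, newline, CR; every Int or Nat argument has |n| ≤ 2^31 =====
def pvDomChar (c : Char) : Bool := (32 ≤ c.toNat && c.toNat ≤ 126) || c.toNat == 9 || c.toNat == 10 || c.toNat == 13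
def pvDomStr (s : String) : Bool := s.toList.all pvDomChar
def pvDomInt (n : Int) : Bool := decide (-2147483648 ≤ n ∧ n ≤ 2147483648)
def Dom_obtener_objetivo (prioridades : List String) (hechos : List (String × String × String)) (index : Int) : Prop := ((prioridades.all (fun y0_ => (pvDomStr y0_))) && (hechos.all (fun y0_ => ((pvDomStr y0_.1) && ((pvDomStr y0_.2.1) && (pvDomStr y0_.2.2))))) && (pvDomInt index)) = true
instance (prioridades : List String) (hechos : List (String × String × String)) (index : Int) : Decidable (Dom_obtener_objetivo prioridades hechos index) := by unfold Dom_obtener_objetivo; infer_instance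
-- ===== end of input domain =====

-- B replaces A's tail recursion (index + 1) by one iterative for-loop over range(index, len(hechos)): simpler, no recursion depth limit.

-- ===== PORT A =====
-- literal port of A's recursion; hechos[index] is pyGet? (negative index wraps; none = IndexError, excluded by Pre_)
def obtener_objetivo (prioridades : List String) (hechos : List (String × String × String)) (index : Int) : Option String :=
  if (hechos.length : Int) ≤ index then none
  else
    match PySem.List.pyGet? hechos index with
    | none => none  -- Python raises IndexError here; outside Pre_
    | some hecho =>
      if hecho.1 = "objetivo" then
        if prioridades.any (fun p => PySem.Str.isIn p hecho.2.2) then some hecho.2.1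
        else obtener_objetivo prioridades hechos (index + 1)
      else obtener_objetivo prioridades hechos (index + 1)
termination_by ((hechos.length : Int) - index).toNat
decreasing_by all_goals (simp_all only [not_le]; omega)

-- ===== PORT B =====
-- the loop body of B, recursing over the remaining list of indices from range(index, len(hechos))
def pvLoopB (prioridades : List String) (hechos : List (String × String × String)) : List Int → Option String
  | [] => none
  | i :: rest =>
    match PySem.List.pyGet? hechos i with
    | none => none  -- Python raises IndexError here; outside Pre_
    | some hecho =>
      if hecho.1 = "objetivo" then
        if prioridades.any (fun p => PySem.Str.isIn p hecho.2.2) then some hecho.2.1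
        else pvLoopB prioridades hechos rest
      else pvLoopB prioridades hechos rest

def obtener_objetivo_alt (prioridades : List String) (hechos : List (String × String × String)) (index : Int) : Option String :=
  pvLoopB prioridades hechos (PySem.List.pyRange index (hechos.length : Int) 1)

-- ===== PRECONDITION & SPEC =====
-- Pre_ excludes only index < -len(hechos), where both Pythons raise IndexError at hechos[index].
def Pre_obtener_objetivo (prioridades : List String) (hechos : List (String × String × String)) (index : Int) : Prop :=
  -(hechos.length : Int) ≤ index
instance (prioridades : List String) (hechos : List (String × String × String)) (index : Int) : Decidable (Pre_obtener_objetivo prioridades hechos index) := by unfold Pre_obtener_objetivo; infer_instance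
def pvWitness_obtener_objetivo : List String × (List (String × String × String)) × Int :=
  (["ahorro"], [("dato", "x", "y"), ("objetivo", "fondo", "ahorro mensual")], 0)
def Spec_obtener_objetivo (prioridades : List String) (hechos : List (String × String × String)) (index : Int) (out : Option String) : Prop := out = obtener_objetivo_alt prioridades hechos index
instance (prioridades : List String) (hechos : List (String × String × String)) (index : Int) (out : Option String) : Decidable (Spec_obtener_objetivo prioridades hechos index out) := by unfold Spec_obtener_objetivo; infer_instance

-- ===== CLAIM (what is proved, stated in full; the proofs are below) =====
def Claim_equal_obtener_objetivo : Prop := ∀ (prioridades : List String) (hechos : List (String × String × String)) (index : Int), Dom_obtener_objetivo prioridades hechos index → Pre_obtener_objetivo prioridades hechos index → Spec_obtener_objetivo prioridades hechos index (obtener_objetivo prioridades hechos index)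

-- ===== LEMMAS AND PROOFS =====

-- A's recursion equals B's loop over range(index, len) — by induction on the remaining length
theorem obtener_eq_loop (prioridades : List String) (hechos : List (String × String × String)) (index : Int) :
    obtener_objetivo prioridades hechos index = obtener_objetivo_alt prioridades hechos index := by
  unfold obtener_objetivo_alt
  by_cases hle : (hechos.length : Int) ≤ index
  · rw [PySem.List.pyRange_one_eq_nil hle]
    unfold obtener_objetivo pvLoopB
    simp [hle]
  · have hlt : index < (hechos.length : Int) := lt_of_not_ge hle
    rw [PySem.List.pyRange_one_cons hlt]
    rw [obtener_objetivo]
    simp only [hle, if_false]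
    unfold pvLoopB
    cases PySem.List.pyGet? hechos index with
    | none => rfl
    | some hecho =>
      simp only
      split
      · split
        · rfl
        · exact obtener_eq_loop prioridades hechos (index + 1)
      · exact obtener_eq_loop prioridades hechos (index + 1)
termination_by ((hechos.length : Int) - index).toNat
decreasing_by all_goals omega

-- ===== VERDICT (by name: the statement is the Claim_ definition above) =====
theorem obtener_objetivo_spec : Claim_equal_obtener_objetivo := by
  intro prioridades hechos index _ _
  unfold Spec_obtener_objetivo
  exact obtener_eq_loop prioridades hechos index
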